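-- pv_equiv track=rewrite | github.com/swapnildahiphale/OpenSRE | config_service/src/api/routes/team.py | _categorize_tool
-- ===== SOURCE A (Python) =====
-- def _categorize_tool(tool_name: str) -> str:
--     """
--     Categorize a tool based on its name.
--
--     This helps organize tools in the UI by grouping related tools together.
--     """
--     tool_lower = tool_name.lower()
--
--     # Cluster management
--     if any(x in tool_lower for x in ["cluster", "stack", "deploy"]):
--         return "Cluster Management"
--
--     # Kubernetes resources
--     if any(
--         x in tool_lower for x in ["k8s", "kubernetes", "resource", "yaml", "manifest"]
--     ):
--         return "Kubernetes Resources"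
--
--     # Troubleshooting
--     if any(x in tool_lower for x in ["log", "event", "debug", "troubleshoot"]):
--         return "Troubleshooting"
--
--     # File operations
--     if any(x in tool_lower for x in ["file", "read", "write", "directory", "list"]):
--         return "File Operations"
--
--     # Database
--     if any(x in tool_lower for x in ["query", "sql", "database", "table"]):
--         return "Database"
--
--     # Git/GitHub
--     if any(
--         x in tool_lower
--         for x in ["git", "github", "repo", "commit", "branch", "pr", "pull"]
--     ):
--         return "Version Control"
--
--     # Communication
--     if any(x in tool_lower for x in ["slack", "message", "channel", "post"]):
--         return "Communication"
--
--     # Documentation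
--     if any(x in tool_lower for x in ["doc", "search", "help"]):
--         return "Documentation"
--
--     return "General"
-- ===== SOURCE B (Python) =====
-- _CATEGORIES = [
--     "Cluster Management", "Kubernetes Resources", "Troubleshooting",
--     "File Operations", "Database", "Version Control", "Communication",
--     "Documentation", "General",
-- ]
--
-- # Inverted index: keyword -> rank (index into _CATEGORIES)
-- _KEYWORD_RANK = {
--     "cluster": 0, "stack": 0, "deploy": 0,
--     "k8s": 1, "kubernetes": 1, "resource": 1, "yaml": 1, "manifest": 1,
--     "log": 2, "event": 2, "debug": 2, "troubleshoot": 2,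
--     "file": 3, "read": 3, "write": 3, "directory": 3, "list": 3,
--     "query": 4, "sql": 4, "database": 4, "table": 4,
--     "git": 5, "github": 5, "repo": 5, "commit": 5, "branch": 5, "pr": 5, "pull": 5,
--     "slack": 6, "message": 6, "channel": 6, "post": 6,
--     "doc": 7, "search": 7, "help": 7,
-- }
--
--
-- def _categorize_tool(tool_name: str) -> str:
--     t = tool_name.lower()
--     best = 8  # rank of "General"
--     for kw, rank in _KEYWORD_RANK.items():
--         if kw in t:
--             best = min(best, rank)
--     return _CATEGORIES[best]
-- ===== Notes on version B (the rewrite author's own statement) =====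
-- stated objective: alternative
-- what changed: Replaces the priority-ordered if-chain with an inverted keyword-to-rank index: one pass over all keywords computes the minimum matching rank, and the result is looked up in a category array.
import Mathlib
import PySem

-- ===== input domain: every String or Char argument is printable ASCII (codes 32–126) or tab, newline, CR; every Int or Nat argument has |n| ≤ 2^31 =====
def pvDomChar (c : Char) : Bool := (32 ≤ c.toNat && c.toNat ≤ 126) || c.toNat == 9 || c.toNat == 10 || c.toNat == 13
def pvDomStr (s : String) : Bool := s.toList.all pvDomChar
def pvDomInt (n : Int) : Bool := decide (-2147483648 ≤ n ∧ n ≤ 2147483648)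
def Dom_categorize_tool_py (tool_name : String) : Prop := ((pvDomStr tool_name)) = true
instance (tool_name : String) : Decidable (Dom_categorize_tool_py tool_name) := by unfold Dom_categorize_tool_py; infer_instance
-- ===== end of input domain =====

-- B replaces A's priority-ordered if-chain with an inverted keyword->rank index: a single pass
-- computes the minimum matching rank and indexes a category array (objective: alternative).


-- ===== PORT A =====
def categorize_tool_py (tool_name : String) : String :=
  let tool_lower := PySem.Str.lower tool_name
  if ["cluster", "stack", "deploy"].any (fun x => PySem.Str.isIn x tool_lower) then
    "Cluster Management"
  else if ["k8s", "kubernetes", "resource", "yaml", "manifest"].any (fun x => PySem.Str.isIn x tool_lower) then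
    "Kubernetes Resources"
  else if ["log", "event", "debug", "troubleshoot"].any (fun x => PySem.Str.isIn x tool_lower) then
    "Troubleshooting"
  else if ["file", "read", "write", "directory", "list"].any (fun x => PySem.Str.isIn x tool_lower) then
    "File Operations"
  else if ["query", "sql", "database", "table"].any (fun x => PySem.Str.isIn x tool_lower) then
    "Database"
  else if ["git", "github", "repo", "commit", "branch", "pr", "pull"].any (fun x => PySem.Str.isIn x tool_lower) then
    "Version Control"
  else if ["slack", "message", "channel", "post"].any (fun x => PySem.Str.isIn x tool_lower) then
    "Communication"
  else if ["doc", "search", "help"].any (fun x => PySem.Str.isIn x tool_lower) then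
    "Documentation"
  else
    "General"

-- ===== PORT B =====
def pvCategories : List String :=
  ["Cluster Management", "Kubernetes Resources", "Troubleshooting",
   "File Operations", "Database", "Version Control", "Communication",
   "Documentation", "General"]

-- inverted index: keyword -> rank (insertion order of the Python dict literal)
def pvKeywordRank : List (String × Nat) :=
  [("cluster", 0), ("stack", 0), ("deploy", 0),
   ("k8s", 1), ("kubernetes", 1), ("resource", 1), ("yaml", 1), ("manifest", 1),
   ("log", 2), ("event", 2), ("debug", 2), ("troubleshoot", 2),
   ("file", 3), ("read", 3), ("write", 3), ("directory", 3), ("list", 3),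
   ("query", 4), ("sql", 4), ("database", 4), ("table", 4),
   ("git", 5), ("github", 5), ("repo", 5), ("commit", 5), ("branch", 5), ("pr", 5), ("pull", 5),
   ("slack", 6), ("message", 6), ("channel", 6), ("post", 6),
   ("doc", 7), ("search", 7), ("help", 7)]

def categorize_tool_py_alt (tool_name : String) : String :=
  let t := PySem.Str.lower tool_name
  let best : Nat := pvKeywordRank.foldl
    (fun best p => if PySem.Str.isIn p.1 t then min best p.2 else best) 8
  (PySem.List.pyGet? pvCategories (Int.ofNat best)).getD "General"

-- ===== PRECONDITION & SPEC =====
def Spec_categorize_tool_py (tool_name : String) (out : String) : Prop := out = categorize_tool_py_alt tool_name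
instance (tool_name : String) (out : String) : Decidable (Spec_categorize_tool_py tool_name out) := by unfold Spec_categorize_tool_py; infer_instance

-- ===== CLAIM =====
def Claim_equal_categorize_tool_py : Prop := ∀ (tool_name : String), Dom_categorize_tool_py tool_name → Spec_categorize_tool_py tool_name (categorize_tool_py tool_name)

-- ===== LEMMAS AND PROOFS =====

-- folding the min-rank step over one keyword group (all with the same rank r)
theorem pv_groupFoldF (f : String → Bool) (kws : List String) (r acc : Nat) :
    (kws.map (fun k => (k, r))).foldl
      (fun best (p : String × Nat) => if f p.1 then min best p.2 else best) acc
    = if kws.any (fun x => f x) then min acc r else acc := by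
  induction kws generalizing acc with
  | nil => simp
  | cons k ks ih =>
    simp only [List.map_cons, List.foldl_cons, List.any_cons, ih]
    rcases Bool.eq_false_or_eq_true (f k) with hf | hf <;>
      rcases Bool.eq_false_or_eq_true (ks.any fun x => f x) with ha | ha <;>
        simp [hf, ha]

-- the same, instantiated at the substring test used by the ports
theorem pv_groupFold (t : String) (kws : List String) (r acc : Nat) :
    (kws.map (fun k => (k, r))).foldl
      (fun best (p : String × Nat) => if PySem.Str.isIn p.1 t then min best p.2 else best) acc
    = if kws.any (fun x => PySem.Str.isIn x t) then min acc r else acc :=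
  pv_groupFoldF (fun s => PySem.Str.isIn s t) kws r acc

-- the flat index is the concatenation of its eight rank groups
theorem pv_rank_groups :
    pvKeywordRank =
      (["cluster", "stack", "deploy"].map (fun k => (k, 0)))
      ++ (["k8s", "kubernetes", "resource", "yaml", "manifest"].map (fun k => (k, 1)))
      ++ (["log", "event", "debug", "troubleshoot"].map (fun k => (k, 2)))
      ++ (["file", "read", "write", "directory", "list"].map (fun k => (k, 3)))
      ++ (["query", "sql", "database", "table"].map (fun k => (k, 4)))
      ++ (["git", "github", "repo", "commit", "branch", "pr", "pull"].map (fun k => (k, 5)))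
      ++ (["slack", "message", "channel", "post"].map (fun k => (k, 6)))
      ++ (["doc", "search", "help"].map (fun k => (k, 7))) := rfl

-- ===== VERDICT =====
theorem categorize_tool_py_spec : Claim_equal_categorize_tool_py := by
  intro tool_name _
  show categorize_tool_py tool_name = categorize_tool_py_alt tool_name
  unfold categorize_tool_py categorize_tool_py_alt
  rw [pv_rank_groups]
  simp only [List.foldl_append, pv_groupFold (PySem.Str.lower tool_name)]
  generalize (["cluster", "stack", "deploy"].any (fun x => PySem.Str.isIn x (PySem.Str.lower tool_name))) = b1
  generalize (["k8s", "kubernetes", "resource", "yaml", "manifest"].any (fun x => PySem.Str.isIn x (PySem.Str.lower tool_name))) = b2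
  generalize (["log", "event", "debug", "troubleshoot"].any (fun x => PySem.Str.isIn x (PySem.Str.lower tool_name))) = b3
  generalize (["file", "read", "write", "directory", "list"].any (fun x => PySem.Str.isIn x (PySem.Str.lower tool_name))) = b4
  generalize (["query", "sql", "database", "table"].any (fun x => PySem.Str.isIn x (PySem.Str.lower tool_name))) = b5
  generalize (["git", "github", "repo", "commit", "branch", "pr", "pull"].any (fun x => PySem.Str.isIn x (PySem.Str.lower tool_name))) = b6
  generalize (["slack", "message", "channel", "post"].any (fun x => PySem.Str.isIn x (PySem.Str.lower tool_name))) = b7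
  generalize (["doc", "search", "help"].any (fun x => PySem.Str.isIn x (PySem.Str.lower tool_name))) = b8
  cases b1 <;> cases b2 <;> cases b3 <;> cases b4 <;> cases b5 <;> cases b6 <;> cases b7 <;> cases b8 <;> rfl
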